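-- pv_equiv track=rewrite | github.com/darkoss1/pysymex | examples/insane_bugpack.py | level4_nested_div
-- ===== SOURCE A (Python) =====
-- def level4_nested_div(a: int, b: int, c: int, d: int, e: int, f: int) -> int:
--     acc = 0
--     for i in range(3):
--         if a + i > b:
--             acc += i + c
--         else:
--             acc -= i + d
--         if e - i > f:
--             acc += 2
--         else:
--             acc -= 2
--
--     if a > 10 and b > 10 and c > 10 and d > 10 and e > 10 and f > 10:
--         return 50 // (acc - acc)
--     return acc
-- ===== SOURCE B (Python) =====
-- def level4_nested_div(a: int, b: int, c: int, d: int, e: int, f: int) -> int: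
--     # Closed form over the three fixed indices: a+i>b holds exactly for the
--     # top k1 indices, e-i>f exactly for the bottom k2 indices.
--     k1 = min(3, max(0, a - b + 2))       # count of i in {0,1,2} with a+i > b
--     k2 = min(3, max(0, e - f))           # count of i in {0,1,2} with e-i > f
--     sumtop = (0, 2, 3, 3)[k1]            # sum of the k1 largest indices of {0,1,2}
--     return sumtop + k1 * c - (3 - sumtop) - (3 - k1) * d + 4 * k2 - 6
-- ===== Notes on version B (the rewrite author's own statement) =====
-- stated objective: simpler
-- what changed: Replaced the 3-iteration accumulator loop by a closed-form count of which of the three indices satisfy each monotone threshold; the all->10 branch, where A deliberately raises ZeroDivisionError via 50 // (acc - acc), is excluded by Pre_ and B simply returns acc there.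
import Mathlib
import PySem

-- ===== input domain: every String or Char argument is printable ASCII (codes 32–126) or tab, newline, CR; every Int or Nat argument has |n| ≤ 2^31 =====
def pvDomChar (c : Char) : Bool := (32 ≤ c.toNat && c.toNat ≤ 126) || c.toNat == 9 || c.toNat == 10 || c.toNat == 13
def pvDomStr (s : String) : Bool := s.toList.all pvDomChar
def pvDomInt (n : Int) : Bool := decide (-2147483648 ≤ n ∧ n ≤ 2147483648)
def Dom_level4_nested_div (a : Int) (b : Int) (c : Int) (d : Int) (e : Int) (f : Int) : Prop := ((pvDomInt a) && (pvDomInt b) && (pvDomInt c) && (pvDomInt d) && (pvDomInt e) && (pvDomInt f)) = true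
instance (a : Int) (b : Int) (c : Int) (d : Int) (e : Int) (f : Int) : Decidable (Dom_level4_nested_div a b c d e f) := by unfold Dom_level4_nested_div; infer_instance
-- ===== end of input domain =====

-- B replaces the 3-step loop by closed-form threshold counts; the deliberate
-- 50 // (acc - acc) crash of A (all inputs > 10) is excluded by Pre_ and B returns acc there.

-- ===== PORT A =====
def level4_nested_div (a : Int) (b : Int) (c : Int) (d : Int) (e : Int) (f : Int) : Int :=
  let acc := (PySem.List.pyRange 0 3 1).foldl (fun acc i =>
    let acc := if a + i > b then acc + (i + c) else acc - (i + d)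
    if e - i > f then acc + 2 else acc - 2) 0
  if a > 10 ∧ b > 10 ∧ c > 10 ∧ d > 10 ∧ e > 10 ∧ f > 10 then
    PySem.Int.floordiv 50 (acc - acc)   -- Python raises ZeroDivisionError here; excluded by Pre_
  else acc

-- ===== PORT B =====
def level4_nested_div_alt (a : Int) (b : Int) (c : Int) (d : Int) (e : Int) (f : Int) : Int :=
  let k1 := min 3 (max 0 (a - b + 2))
  let k2 := min 3 (max 0 (e - f))
  let sumtop := if k1 = 0 then 0 else if k1 = 1 then 2 else 3
  sumtop + k1 * c - (3 - sumtop) - (3 - k1) * d + 4 * k2 - 6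

-- ===== PRECONDITION & SPEC =====
-- Pre_ excludes exactly the inputs on which A raises ZeroDivisionError (all six > 10).
def Pre_level4_nested_div (a : Int) (b : Int) (c : Int) (d : Int) (e : Int) (f : Int) : Prop :=
  ¬ (a > 10 ∧ b > 10 ∧ c > 10 ∧ d > 10 ∧ e > 10 ∧ f > 10)
instance (a : Int) (b : Int) (c : Int) (d : Int) (e : Int) (f : Int) : Decidable (Pre_level4_nested_div a b c d e f) := by unfold Pre_level4_nested_div; infer_instance
def pvWitness_level4_nested_div : Int × Int × Int × Int × Int × Int := (1, 2, 3, 4, 5, 6)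

def Spec_level4_nested_div (a : Int) (b : Int) (c : Int) (d : Int) (e : Int) (f : Int) (out : Int) : Prop := out = level4_nested_div_alt a b c d e f
instance (a : Int) (b : Int) (c : Int) (d : Int) (e : Int) (f : Int) (out : Int) : Decidable (Spec_level4_nested_div a b c d e f out) := by unfold Spec_level4_nested_div; infer_instance

-- ===== CLAIM =====
def Claim_equal_level4_nested_div : Prop := ∀ (a : Int) (b : Int) (c : Int) (d : Int) (e : Int) (f : Int), Dom_level4_nested_div a b c d e f → Pre_level4_nested_div a b c d e f → Spec_level4_nested_div a b c d e f (level4_nested_div a b c d e f)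

-- ===== LEMMAS AND PROOFS =====
theorem pyRange03 : PySem.List.pyRange 0 3 1 = [0, 1, 2] := by decide

-- ===== VERDICT =====
set_option maxHeartbeats 1000000 in
theorem level4_nested_div_spec : Claim_equal_level4_nested_div := by
  intro a b c d e f _ hpre
  unfold Spec_level4_nested_div level4_nested_div level4_nested_div_alt
  rw [pyRange03]
  simp only [List.foldl]
  rw [if_neg hpre]
  have h4 : min 3 (max 0 (a - b + 2)) = 0 ∨ min 3 (max 0 (a - b + 2)) = 1 ∨
      min 3 (max 0 (a - b + 2)) = 2 ∨ min 3 (max 0 (a - b + 2)) = 3 := by omega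
  rcases h4 with h | h | h | h <;> simp only [h] <;> norm_num <;> split_ifs <;> omega
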